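-- pv_equiv track=rewrite | github.com/saharking1298/frank-the-prank-host | src/Features.py | anti_error_encoder
-- ===== SOURCE A (Python) =====
-- def anti_error_encoder(result_to_send):
--     """
--     Firebase cant have special characters, such as $ # [ ] / or ., to be in the key value.
--     This function encodes the result the host is suppose to send, to prevent errors in server logic level.
--     NOTE: The result should be decoded also at the remote.
--     :param result_to_send: The result that should be sent to the remote user
--     :return: The same result, decoded.
--     """
--     special_chars_replacements = {'$': "%DoLlAr%",
--                                   '#': "%HaShTaG%",
--                                   '[': "%RiHgT-BrAcKeTSs%",
--                                   ']': "%LeFt-BrAcKeTSs%",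
--                                   '/': "%SlAsH%",
--                                   '.': "%PoInT%"}
--     if type(result_to_send) == dict:
--         encoded_result = {}
--         for key in result_to_send:
--             encoded_key = key
--             for char in special_chars_replacements:
--                 encoded_key = encoded_key.replace(char, special_chars_replacements[char])
--             encoded_result[encoded_key] = result_to_send[key]
--         return encoded_result
--     else:
--         return result_to_send
-- ===== SOURCE B (Python) =====
-- def anti_error_encoder(result_to_send):
--     """
--     Firebase can't have special characters such as $ # [ ] / or . in key values.
--     Encode every key of the dict in a single character-wise pass.
--     """
--     if type(result_to_send) != dict:
--         return result_to_send
--     table = str.maketrans({'$': "%DoLlAr%",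
--                            '#': "%HaShTaG%",
--                            '[': "%RiHgT-BrAcKeTSs%",
--                            ']': "%LeFt-BrAcKeTSs%",
--                            '/': "%SlAsH%",
--                            '.': "%PoInT%"})
--     return {key.translate(table): value for key, value in result_to_send.items()}
-- ===== Notes on version B (the rewrite author's own statement) =====
-- stated objective: idiomatic
-- what changed: Each key is encoded in one simultaneous character-wise pass via a precomputed str.maketrans translation table (and the dict is rebuilt by a comprehension over items) instead of six sequential full-string .replace() passes per key.
import Mathlib
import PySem

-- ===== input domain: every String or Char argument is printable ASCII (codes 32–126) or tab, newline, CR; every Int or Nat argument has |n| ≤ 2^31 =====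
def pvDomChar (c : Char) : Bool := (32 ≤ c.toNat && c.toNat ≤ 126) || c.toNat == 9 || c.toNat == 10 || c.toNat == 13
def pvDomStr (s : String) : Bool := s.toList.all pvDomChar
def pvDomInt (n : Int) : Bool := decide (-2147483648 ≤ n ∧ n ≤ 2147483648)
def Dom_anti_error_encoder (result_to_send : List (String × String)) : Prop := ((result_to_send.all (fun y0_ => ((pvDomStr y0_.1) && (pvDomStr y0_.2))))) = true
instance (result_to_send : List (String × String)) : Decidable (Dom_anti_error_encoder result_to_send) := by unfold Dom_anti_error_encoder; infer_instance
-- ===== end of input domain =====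

-- B encodes each key in one simultaneous character-wise pass (a translation table) instead of
-- A's six sequential full-string .replace passes; same return value on every dict input.

-- ===== PORT A =====
-- the special_chars_replacements dict, in A's insertion order
def pvPairsA : List (String × String) :=
  [("$", "%DoLlAr%"), ("#", "%HaShTaG%"), ("[", "%RiHgT-BrAcKeTSs%"),
   ("]", "%LeFt-BrAcKeTSs%"), ("/", "%SlAsH%"), (".", "%PoInT%")]

-- inner loop of A: encoded_key = encoded_key.replace(char, special_chars_replacements[char])
def pvEncA (key : String) : String :=
  pvPairsA.foldl (fun encoded_key p => PySem.Str.replace encoded_key p.1 p.2) key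

-- outer loop: for key in result_to_send: encoded_result[encoded_key] = result_to_send[key]
def anti_error_encoder (result_to_send : List (String × String)) : List (String × String) :=
  (result_to_send.foldl
    (fun (encoded_result : PySem.Dict String String) kv =>
      match (PySem.Dict.mk result_to_send).get? kv.1 with
      | some v => encoded_result.insert (pvEncA kv.1) v
      | none => encoded_result)   -- unreachable: kv.1 is a key of the dict
    (PySem.Dict.mk [])).items

-- ===== PORT B =====
-- the translation table: one character maps to its replacement, others to themselves
def pvRepl (c : Char) : List Char :=
  if c = '$' then "%DoLlAr%".toList
  else if c = '#' then "%HaShTaG%".toList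
  else if c = '[' then "%RiHgT-BrAcKeTSs%".toList
  else if c = ']' then "%LeFt-BrAcKeTSs%".toList
  else if c = '/' then "%SlAsH%".toList
  else if c = '.' then "%PoInT%".toList
  else [c]

-- key.translate(table): a single character-wise pass
def pvEncB (key : String) : String := String.ofList (key.toList.flatMap pvRepl)

def anti_error_encoder_alt (result_to_send : List (String × String)) : List (String × String) :=
  (result_to_send.foldl
    (fun (d : PySem.Dict String String) kv => d.insert (pvEncB kv.1) kv.2)
    (PySem.Dict.mk [])).items

-- ===== PRECONDITION & SPEC =====
-- Pre_ restricts the association list to pairwise-distinct keys: exactly the shape a Python dict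
-- guarantees (a dict cannot hold duplicate keys), so nothing A accepts is excluded.
def Pre_anti_error_encoder (result_to_send : List (String × String)) : Prop :=
  (result_to_send.map Prod.fst).Nodup
instance (result_to_send : List (String × String)) : Decidable (Pre_anti_error_encoder result_to_send) := by unfold Pre_anti_error_encoder; infer_instance

def pvWitness_anti_error_encoder : (List (String × String)) := [("a.b$", "1"), ("x[0]/y", "2")]

def Spec_anti_error_encoder (result_to_send : List (String × String)) (out : List (String × String)) : Prop := out = anti_error_encoder_alt result_to_send
instance (result_to_send : List (String × String)) (out : List (String × String)) : Decidable (Spec_anti_error_encoder result_to_send out) := by unfold Spec_anti_error_encoder; infer_instance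

-- ===== CLAIM (what is proved, stated in full; the proofs are below) =====
def Claim_equal_anti_error_encoder : Prop := ∀ (result_to_send : List (String × String)), Dom_anti_error_encoder result_to_send → Pre_anti_error_encoder result_to_send → Spec_anti_error_encoder result_to_send (anti_error_encoder result_to_send)

-- ===== LEMMAS AND PROOFS =====

-- single-character-pattern replace is a character-wise pass
theorem pv_go_single (c : Char) (new : List Char) :
    ∀ (l acc : List Char),
      PySem.Chars.replace.go [c] new l.length l acc
        = acc.reverse ++ l.flatMap (fun a => if a = c then new else [a]) := by
  intro l
  induction l with
  | nil => intro acc; simp [PySem.Chars.replace.go]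
  | cons a t ih =>
    intro acc
    by_cases h : c = a
    · subst h
      simp [PySem.Chars.replace.go, List.isPrefixOf, ih]
    · have hba : (c == a) = false := by simp [h]
      simp [PySem.Chars.replace.go, List.isPrefixOf, hba, ih, Ne.symm h]

theorem pv_replace_single (c : Char) (new l : List Char) :
    PySem.Chars.replace l [c] new = l.flatMap (fun a => if a = c then new else [a]) := by
  simpa [PySem.Chars.replace] using pv_go_single c new l []

-- the six sequential passes, as one function on char lists
def pvChainA (l : List Char) : List Char :=
  pvPairsA.foldl (fun acc p => PySem.Chars.replace acc p.1.toList p.2.toList) l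

theorem pvChainA_append (x y : List Char) : pvChainA (x ++ y) = pvChainA x ++ pvChainA y := by
  simp [pvChainA, pvPairsA, pv_replace_single, List.flatMap_append]

theorem pvChainA_single (a : Char) : pvChainA [a] = pvRepl a := by
  by_cases h1 : a = '$'; · subst h1; decide
  by_cases h2 : a = '#'; · subst h2; decide
  by_cases h3 : a = '['; · subst h3; decide
  by_cases h4 : a = ']'; · subst h4; decide
  by_cases h5 : a = '/'; · subst h5; decide
  by_cases h6 : a = '.'; · subst h6; decide
  simp [pvChainA, pvPairsA, pv_replace_single, pvRepl, h1, h2, h3, h4, h5, h6]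

theorem pvChainA_eq_flatMap (l : List Char) : pvChainA l = l.flatMap pvRepl := by
  induction l with
  | nil => decide
  | cons a t ih =>
    have : pvChainA (a :: t) = pvChainA [a] ++ pvChainA t := by
      simpa using pvChainA_append [a] t
    simp [this, pvChainA_single, ih]

theorem pvEncA_eq_pvEncB (key : String) : pvEncA key = pvEncB key := by
  apply String.toList_inj.mp
  have hA : (pvEncA key).toList = pvChainA key.toList := by
    simp [pvEncA, pvChainA, pvPairsA, List.foldl, PySem.Str.toList_replace]
  rw [hA, pvChainA_eq_flatMap]
  simp [pvEncB]

-- with pairwise-distinct keys, looking a key of the list up gives its stored value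
theorem pv_get?_mk_of_nodup (rts : List (String × String)) (h : (rts.map Prod.fst).Nodup)
    {a b : String} (hm : (a, b) ∈ rts) : (PySem.Dict.mk rts).get? a = some b := by
  induction rts with
  | nil => cases hm
  | cons p t ih =>
    simp only [List.map_cons, List.nodup_cons] at h
    rcases List.mem_cons.mp hm with h1 | h1
    · subst h1
      simp [PySem.Dict.get?, List.find?]
    · have hne : p.1 ≠ a := by
        intro he
        exact h.1 (by simpa [he] using List.mem_map_of_mem (f := Prod.fst) h1)
      have hb : (p.1 == a) = false := by simp [hne]
      have := ih h.2 h1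
      simpa [PySem.Dict.get?, List.find?, hb] using this

-- ===== VERDICT (by name: the statement is the Claim_ definition above) =====
theorem anti_error_encoder_spec : Claim_equal_anti_error_encoder := by
  intro rts _ hpre
  show _ = _
  unfold anti_error_encoder anti_error_encoder_alt
  congr 1
  apply PySem.List.foldl_congr_mem
  intro acc kv hkv
  rw [pv_get?_mk_of_nodup rts hpre (by simpa using hkv), pvEncA_eq_pvEncB]
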